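-- pv_equiv track=rewrite | github.com/Grae-Drake/Python_Euler | Question 23 test2.py | list_abundant_sums
-- ===== SOURCE A (Python) =====
-- import math
--
-- def calc_proper_factors(x):
--     proper_factors = []
--     for item in range(2,int(math.sqrt(x)+1)):
--         if x % item == 0:
--             proper_factors.append(item)
--
--             if int(x/item) not in proper_factors:
--                 proper_factors.append(int(x/item))
--     proper_factors.append(1)
--     return proper_factors
--
-- def list_abundant_nums(limit):
--     big_list = [[item, 0] for item in range(1,limit+1)]
--     for item in big_list:
--         item[1] = sum(calc_proper_factors(item[0]))
--
--     abundant_nums = []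
--     for item in big_list:
--         if item[0] < item[1]:
--             abundant_nums.append(item[0])
--     return abundant_nums
--
-- def list_abundant_sums(limit):
--     abundant_sums = []
--     abundant_nums = list_abundant_nums(limit)
--     found = False
--
--     for i in range(len(abundant_nums)):
--         for j in range(len(abundant_nums)):
--             an_sum = abundant_nums[i] + abundant_nums[j]
--             if (an_sum >= limit): break
--             else: abundant_sums.append(an_sum)
--     return abundant_sums
-- ===== SOURCE B (Python) =====
-- def list_abundant_sums(limit):
--     # Divisor-sum sieve: iterate over divisors instead of trial-dividing each number.
--     divsum = [0] * (limit + 1)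
--     for d in range(1, limit + 1):
--         for m in range(2 * d, limit + 1, d):
--             divsum[m] += d
--     abundant = [n for n in range(1, limit + 1) if n < divsum[n]]
--     # abundant is ascending, so for each x the partners y with x + y < limit form a
--     # prefix whose end moves only left as x grows: a two-pointer sweep.
--     sums = []
--     cut = len(abundant)
--     for x in abundant:
--         while cut > 0 and x + abundant[cut - 1] >= limit:
--             cut -= 1
--         sums += [x + y for y in abundant[:cut]]
--     return sums
-- ===== Notes on version B (the rewrite author's own statement) =====
-- stated objective: faster
-- what changed: Replaces per-number sqrt trial division with a divisor-sum sieve over multiples, and replaces the inner break scan by a two-pointer cutoff over the sorted abundant list with prefix slices.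
import Mathlib
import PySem

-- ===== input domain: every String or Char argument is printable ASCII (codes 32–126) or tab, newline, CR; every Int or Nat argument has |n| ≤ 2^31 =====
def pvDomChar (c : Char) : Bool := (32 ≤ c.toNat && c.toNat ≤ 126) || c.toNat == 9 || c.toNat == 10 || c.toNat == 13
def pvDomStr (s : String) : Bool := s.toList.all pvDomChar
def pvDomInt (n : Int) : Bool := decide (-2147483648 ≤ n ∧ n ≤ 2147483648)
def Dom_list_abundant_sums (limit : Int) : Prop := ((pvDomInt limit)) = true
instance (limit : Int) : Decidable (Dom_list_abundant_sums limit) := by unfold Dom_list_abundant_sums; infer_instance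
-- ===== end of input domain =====

-- B replaces A's per-number sqrt trial division by a divisor-sum sieve over multiples and
-- A's per-element break scan by a two-pointer cutoff over the sorted abundant list (objective: faster).

-- ===== PORT A =====
-- int(math.sqrt(x)+1) == isqrt(x)+1 for 0 ≤ x ≤ 2^31: the double sqrt is correctly rounded and
-- √(k²-1) is at least 1/(2k) ≥ 2⁻¹⁷ below k while a double near 46341 has ulp ≈ 2⁻³⁸, so the
-- float never reaches the next integer; ported with Nat.sqrt (exact on this domain).
def calcProperFactors (x : Int) : List Int :=
  (PySem.List.pyRange 2 ((Nat.sqrt x.toNat : Int) + 1) 1).foldl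
    (fun pf item =>
      if PySem.Int.mod x item = 0 then
        -- int(x/item): exact, since item divides x here and the float quotient is an integer ≤ 2^31
        if PySem.Int.floordiv x item ∈ pf ++ [item] then pf ++ [item]
        else (pf ++ [item]) ++ [PySem.Int.floordiv x item]
      else pf) []
  ++ [1]

-- 'for item in big_list: item[1] = sum(...)' mutates each pair in place: ported as a map
def listAbundantNums (limit : Int) : List Int :=
  let bigList := (PySem.List.pyRange 1 (limit + 1) 1).map (fun item => (item, (0 : Int)))
  let bigList2 := bigList.map (fun p => (p.1, (calcProperFactors p.1).sum))
  bigList2.foldl (fun acc p => if p.1 < p.2 then acc ++ [p.1] else acc) ([] : List Int)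

-- inner 'for j in range(len(abundant_nums))' with its break
def innerA (limit : Int) (nums : List Int) (ai : Int) : List Int → List Int → List Int
  | [], acc => acc
  | j :: js, acc =>
    if limit ≤ ai + PySem.List.pyGetD nums j 0 then acc
    else innerA limit nums ai js (acc ++ [ai + PySem.List.pyGetD nums j 0])

def outerA (limit : Int) (nums : List Int) : List Int → List Int → List Int
  | [], acc => acc
  | i :: is, acc =>
    outerA limit nums is
      (innerA limit nums (PySem.List.pyGetD nums i 0) (PySem.List.pyRange 0 (nums.length : Int) 1) acc)

def list_abundant_sums (limit : Int) : List Int :=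
  let nums := listAbundantNums limit
  outerA limit nums (PySem.List.pyRange 0 (nums.length : Int) 1) []

-- ===== PORT B =====
def sieve (limit : Int) : List Int :=
  (PySem.List.pyRange 1 (limit + 1) 1).foldl
    (fun ds d =>
      (PySem.List.pyRange (2 * d) (limit + 1) d).foldl
        (fun ds m => PySem.List.pySetD ds m (PySem.List.pyGetD ds m 0 + d)) ds)
    (List.replicate (limit + 1).toNat (0 : Int))

-- 'while cut > 0 and x + abundant[cut - 1] >= limit: cut -= 1' (abundant[cut-1] is in range here)
def shrinkCut (limit x : Int) (ab : List Int) : Nat → Nat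
  | 0 => 0
  | cut + 1 =>
    if limit ≤ x + PySem.List.pyGetD ab (cut : Nat) 0 then shrinkCut limit x ab cut
    else cut + 1

-- 'for x in abundant: <while loop>; sums += [x + y for y in abundant[:cut]]'
-- (abundant[:cut] with 0 ≤ cut ≤ len is List.take cut)
def sweep (limit : Int) (ab : List Int) : List Int → Nat → List Int → List Int
  | [], _, acc => acc
  | x :: xs, cut, acc =>
    let cut' := shrinkCut limit x ab cut
    sweep limit ab xs cut' (acc ++ (ab.take cut').map (fun y => x + y))

def list_abundant_sums_alt (limit : Int) : List Int :=
  let ds := sieve limit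
  let ab := (PySem.List.pyRange 1 (limit + 1) 1).filter
    (fun n => decide (n < PySem.List.pyGetD ds n 0))
  sweep limit ab ab ab.length []

-- ===== PRECONDITION & SPEC =====
def Spec_list_abundant_sums (limit : Int) (out : List Int) : Prop := out = list_abundant_sums_alt limit
instance (limit : Int) (out : List Int) : Decidable (Spec_list_abundant_sums limit out) := by unfold Spec_list_abundant_sums; infer_instance

-- ===== CLAIM (what is proved, stated in full; the proofs are below) =====
def Claim_equal_list_abundant_sums : Prop := ∀ (limit : Int), Dom_list_abundant_sums limit → Spec_list_abundant_sums limit (list_abundant_sums limit)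

-- ===== LEMMAS AND PROOFS =====

-- sum of proper divisors (other than 1, resp. all), as ℕ finset sums
def spd1 (N : ℕ) : ℕ := ∑ d ∈ N.properDivisors.erase 1, d
def spd (N : ℕ) : ℕ := ∑ d ∈ N.properDivisors, d

-- ---- pairwise-loop part ----
-- A's index loops, re-expressed as element loops with the same break (proof helpers)
def innerB (limit x : Int) : List Int → List Int → List Int
  | [], acc => acc
  | y :: ys, acc =>
    if limit ≤ x + y then acc
    else innerB limit x ys (acc ++ [x + y])

def outerB (limit : Int) (ab : List Int) : List Int → List Int → List Int
  | [], acc => acc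
  | x :: xs, acc => outerB limit ab xs (innerB limit x ab acc)

theorem innerA_eq (limit : Int) (nums : List Int) (ai : Int) :
    ∀ js acc, innerA limit nums ai js acc
      = innerB limit ai (js.map (fun j => PySem.List.pyGetD nums j 0)) acc := by
  intro js
  induction js with
  | nil => intro acc; rfl
  | cons j js ih =>
    intro acc
    simp only [innerA, List.map_cons, innerB]
    by_cases h : limit ≤ ai + PySem.List.pyGetD nums j 0
    · rw [if_pos h, if_pos h]
    · rw [if_neg h, if_neg h, ih]

theorem outerA_eq (limit : Int) (nums : List Int) :
    ∀ is acc, outerA limit nums is acc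
      = outerB limit nums (is.map (fun i => PySem.List.pyGetD nums i 0)) acc := by
  intro is
  induction is with
  | nil => intro acc; rfl
  | cons i is ih =>
    intro acc
    simp only [outerA, List.map_cons, outerB]
    rw [ih, innerA_eq, PySem.List.map_pyGetD_pyRange_zero' nums 0]

-- ---- generic sum helpers ----
theorem sum_map_range (g : ℕ → ℤ) : ∀ m, ((List.range m).map g).sum = ∑ k ∈ Finset.range m, g k := by
  intro m
  induction m with
  | zero => simp
  | succ m ih => rw [List.range_succ, List.map_append, List.sum_append, Finset.sum_range_succ, ih]; simp

theorem sum_map_pyRange (a b : Int) (f : Int → Int) :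
    ((PySem.List.pyRange a b 1).map f).sum = ∑ k ∈ Finset.range (b - a).toNat, f (a + (k : Int)) := by
  rw [PySem.List.pyRange_one, List.map_map]
  exact sum_map_range (fun k => f (a + (k : Int))) _

theorem sum_flatMap (f : Int → List Int) : ∀ l : List Int,
    (l.flatMap f).sum = (l.map (fun d => (f d).sum)).sum := by
  intro l
  induction l with
  | nil => rfl
  | cons d l ih => simp only [List.flatMap_cons, List.map_cons, List.sum_append, List.sum_cons, ih]

-- ---- A side: the sqrt-pairing identity over ℕ ----
theorem pairing (N : ℕ) (hN : 1 ≤ N) :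
    (∑ d ∈ Finset.Ico 2 (N.sqrt + 1),
      (if d ∣ N then (if N / d = d then d else d + N / d) else 0)) = spd1 N := by
  classical
  have hP : ∀ d, d ∈ N.properDivisors.erase 1 ↔ (d ∣ N ∧ 2 ≤ d ∧ d < N) := by
    intro d
    simp only [Finset.mem_erase, Nat.mem_properDivisors]
    constructor
    · rintro ⟨h1, h2, h3⟩
      have : 1 ≤ d := Nat.pos_of_dvd_of_pos h2 hN
      exact ⟨h2, by omega, h3⟩
    · rintro ⟨h1, h2, h3⟩; exact ⟨by omega, h1, h3⟩
  have hL : Finset.filter (fun d => d ∣ N) (Finset.Ico 2 (N.sqrt + 1))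
      = Finset.filter (fun d => d * d ≤ N) (N.properDivisors.erase 1) := by
    ext d
    simp only [Finset.mem_filter, Finset.mem_Ico, hP, Nat.lt_succ_iff, Nat.le_sqrt]
    constructor
    · rintro ⟨⟨h2, hsq⟩, hdvd⟩
      have h2d : 2 * d ≤ d * d := by nlinarith
      exact ⟨⟨hdvd, h2, by omega⟩, hsq⟩
    · rintro ⟨⟨hdvd, h2, _⟩, hsq⟩
      exact ⟨⟨h2, hsq⟩, hdvd⟩
  rw [← Finset.sum_filter, hL]
  have hsummand : ∀ d ∈ Finset.filter (fun d => d * d ≤ N) (N.properDivisors.erase 1),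
      (if N / d = d then d else d + N / d) = d + (if N / d = d then 0 else N / d) := by
    intro d _; by_cases h : N / d = d <;> simp [h]
  rw [Finset.sum_congr rfl hsummand, Finset.sum_add_distrib]
  have h2nd : ∑ d ∈ Finset.filter (fun d => d * d ≤ N) (N.properDivisors.erase 1), (if N / d = d then 0 else N / d)
      = ∑ d ∈ Finset.filter (fun d => d * d < N) (N.properDivisors.erase 1), N / d := by
    rw [Finset.sum_filter, Finset.sum_filter]
    refine Finset.sum_congr rfl ?_
    intro d hd
    obtain ⟨hdvd, h2, hdN⟩ := (hP d).mp hd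
    have hq : d * (N / d) = N := Nat.mul_div_cancel' hdvd
    rcases lt_trichotomy (d * d) N with h | h | h
    · have hne : ¬ N / d = d := by intro he; rw [he] at hq; omega
      rw [if_pos (le_of_lt h), if_pos h, if_neg hne]
    · have he : N / d = d :=
        Nat.eq_of_mul_eq_mul_left (by omega) (show d * (N / d) = d * d by omega)
      rw [if_pos (le_of_eq h), if_pos he, if_neg (by omega)]
    · rw [if_neg (by omega), if_neg (by omega)]
  rw [h2nd]
  have hbij : ∑ d ∈ Finset.filter (fun d => d * d < N) (N.properDivisors.erase 1), N / d
      = ∑ d ∈ Finset.filter (fun d => N < d * d) (N.properDivisors.erase 1), d := by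
    refine Finset.sum_nbij' (fun d => N / d) (fun d => N / d) ?_ ?_ ?_ ?_ ?_
    · intro d hd
      simp only [Finset.mem_filter, hP] at hd ⊢
      obtain ⟨⟨hdvd, h2, hdN⟩, hlt⟩ := hd
      have hq : d * (N / d) = N := Nat.mul_div_cancel' hdvd
      have hq1 : 1 ≤ N / d := Nat.div_pos (Nat.le_of_dvd (by omega) hdvd) (by omega)
      have hdq : d < N / d := by nlinarith
      refine ⟨⟨Nat.div_dvd_of_dvd hdvd, by omega, by nlinarith⟩, by nlinarith⟩
    · intro d hd
      simp only [Finset.mem_filter, hP] at hd ⊢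
      obtain ⟨⟨hdvd, h2, hdN⟩, hlt⟩ := hd
      have hq : d * (N / d) = N := Nat.mul_div_cancel' hdvd
      have hq1 : 1 ≤ N / d := Nat.div_pos (Nat.le_of_dvd (by omega) hdvd) (by omega)
      have hqd : N / d < d := by nlinarith
      have hq2 : N / d ≠ 1 := by intro he; rw [he, Nat.mul_one] at hq; omega
      refine ⟨⟨Nat.div_dvd_of_dvd hdvd, by omega, by omega⟩, by nlinarith⟩
    · intro d hd
      simp only [Finset.mem_filter, hP] at hd
      exact Nat.div_div_self hd.1.1 (by omega)
    · intro d hd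
      simp only [Finset.mem_filter, hP] at hd
      exact Nat.div_div_self hd.1.1 (by omega)
    · intro d _; rfl
  rw [hbij]
  have hnotle : Finset.filter (fun d => N < d * d) (N.properDivisors.erase 1)
      = Finset.filter (fun d => ¬ d * d ≤ N) (N.properDivisors.erase 1) := by
    refine Finset.filter_congr ?_
    intro d _; exact lt_iff_not_ge
  rw [hnotle]
  unfold spd1
  exact Finset.sum_filter_add_sum_filter_not _ _ _

-- ---- A side: the trial-division fold builds exactly the divisor/cofactor blocks ----
theorem calc_fold (x : Int) (hx : 1 ≤ x) :
    ∀ (n : ℕ) (a : Int) (pf : List Int),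
      ((Nat.sqrt x.toNat : Int) + 1) - a ≤ (n : Int) → 2 ≤ a →
      (∀ e ∈ pf, ∃ d : Int, 2 ≤ d ∧ d < a ∧ d ∣ x ∧ (e = d ∨ e = x / d)) →
      (PySem.List.pyRange a ((Nat.sqrt x.toNat : Int) + 1) 1).foldl
        (fun pf item =>
          if PySem.Int.mod x item = 0 then
            if PySem.Int.floordiv x item ∈ pf ++ [item] then pf ++ [item]
            else (pf ++ [item]) ++ [PySem.Int.floordiv x item]
          else pf) pf
      = pf ++ (PySem.List.pyRange a ((Nat.sqrt x.toNat : Int) + 1) 1).flatMap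
          (fun d => if PySem.Int.mod x d = 0 then
              (if PySem.Int.floordiv x d = d then [d] else [d, PySem.Int.floordiv x d])
            else []) := by
  intro n
  induction n with
  | zero =>
    intro a pf hle h2 _
    rw [PySem.List.pyRange_one_eq_nil (by push_cast at hle; omega)]
    simp
  | succ n ih =>
    intro a pf hle h2 hinv
    by_cases hab : (Nat.sqrt x.toNat : Int) + 1 ≤ a
    · rw [PySem.List.pyRange_one_eq_nil hab]; simp
    · rw [not_le] at hab
      rw [PySem.List.pyRange_one_cons hab]
      simp only [List.foldl_cons, List.flatMap_cons]
      have ha0 : (0:ℤ) < a := by omega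
      have haa : a * a ≤ x := by
        have hs : a.toNat ≤ Nat.sqrt x.toNat := by omega
        have h1 := Nat.le_sqrt.mp hs
        have h2' : ((a.toNat * a.toNat : ℕ) : ℤ) ≤ ((x.toNat : ℕ) : ℤ) := by exact_mod_cast h1
        push_cast at h2'
        rw [Int.toNat_of_nonneg (le_of_lt ha0), Int.toNat_of_nonneg (by omega)] at h2'
        exact h2'
      by_cases hmod : PySem.Int.mod x a = 0
      · have hdvd : a ∣ x := (PySem.Int.mod_eq_zero_iff_dvd x a).mp hmod
        have hfd : PySem.Int.floordiv x a = x / a := PySem.Int.floordiv_eq_ediv_of_pos ha0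
        have hq1 : a ≤ x / a := by rw [Int.le_ediv_iff_mul_le ha0]; exact haa
        have hqmul : x / a * a = x := Int.ediv_mul_cancel hdvd
        have hnot : x / a ∉ pf := by
          intro hmem
          obtain ⟨d, hd2, hda, hddvd, hcase⟩ := hinv _ hmem
          have hdmul : x / d * d = x := Int.ediv_mul_cancel hddvd
          rcases hcase with h | h
          · omega
          · rw [← h] at hdmul
            have hxa1 : (1:ℤ) ≤ x / a := by omega
            nlinarith
        by_cases hq : x / a = a
        · have hfq : PySem.Int.floordiv x a = a := by rw [hfd, hq]
          have hmem : PySem.Int.floordiv x a ∈ pf ++ [a] := by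
            rw [hfq]; exact List.mem_append_right _ (List.mem_singleton.mpr rfl)
          have hinit : (if PySem.Int.mod x a = 0 then
              (if PySem.Int.floordiv x a ∈ pf ++ [a] then pf ++ [a]
                else (pf ++ [a]) ++ [PySem.Int.floordiv x a]) else pf) = pf ++ [a] := by
            rw [if_pos hmod, if_pos hmem]
          have hblock : (if PySem.Int.mod x a = 0 then
              (if PySem.Int.floordiv x a = a then [a] else [a, PySem.Int.floordiv x a])
              else ([] : List Int)) = [a] := by
            rw [if_pos hmod, if_pos hfq]
          rw [hinit, hblock, ih (a + 1) (pf ++ [a]) (by push_cast at hle ⊢; omega) (by omega) ?_]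
          · rw [List.append_assoc]
          · intro e he
            rcases List.mem_append.mp he with he | he
            · obtain ⟨d, hd⟩ := hinv _ he
              exact ⟨d, hd.1, by omega, hd.2.2⟩
            · rw [List.mem_singleton.mp he]
              exact ⟨a, h2, by omega, hdvd, Or.inl rfl⟩
        · have hmem : PySem.Int.floordiv x a ∉ pf ++ [a] := by
            rw [hfd]
            intro hmem
            rcases List.mem_append.mp hmem with h | h
            · exact hnot h
            · exact hq (List.mem_singleton.mp h)
          have hfq : ¬ PySem.Int.floordiv x a = a := by rw [hfd]; exact hq
          have hinit : (if PySem.Int.mod x a = 0 then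
              (if PySem.Int.floordiv x a ∈ pf ++ [a] then pf ++ [a]
                else (pf ++ [a]) ++ [PySem.Int.floordiv x a]) else pf)
              = (pf ++ [a]) ++ [PySem.Int.floordiv x a] := by
            rw [if_pos hmod, if_neg hmem]
          have hblock : (if PySem.Int.mod x a = 0 then
              (if PySem.Int.floordiv x a = a then [a] else [a, PySem.Int.floordiv x a])
              else ([] : List Int)) = [a, PySem.Int.floordiv x a] := by
            rw [if_pos hmod, if_neg hfq]
          rw [hinit, hblock, hfd,
            ih (a + 1) (pf ++ [a] ++ [x / a]) (by push_cast at hle ⊢; omega) (by omega) ?_]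
          · simp [List.append_assoc]
          · intro e he
            rcases List.mem_append.mp he with he | he
            · rcases List.mem_append.mp he with he | he
              · obtain ⟨d, hd⟩ := hinv _ he
                exact ⟨d, hd.1, by omega, hd.2.2⟩
              · rw [List.mem_singleton.mp he]
                exact ⟨a, h2, by omega, hdvd, Or.inl rfl⟩
            · rw [List.mem_singleton.mp he]
              exact ⟨a, h2, by omega, hdvd, Or.inr rfl⟩
      · have hinit : (if PySem.Int.mod x a = 0 then
              (if PySem.Int.floordiv x a ∈ pf ++ [a] then pf ++ [a]
                else (pf ++ [a]) ++ [PySem.Int.floordiv x a]) else pf) = pf := if_neg hmod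
        have hblock : (if PySem.Int.mod x a = 0 then
              (if PySem.Int.floordiv x a = a then [a] else [a, PySem.Int.floordiv x a])
              else ([] : List Int)) = [] := if_neg hmod
        rw [hinit, hblock, ih (a + 1) pf (by push_cast at hle ⊢; omega) (by omega) ?_]
        · rw [List.nil_append]
        · intro e he
          obtain ⟨d, hd⟩ := hinv _ he
          exact ⟨d, hd.1, by omega, hd.2.2⟩

theorem calc_sum (x : Int) (hx : 1 ≤ x) :
    (calcProperFactors x).sum = 1 + (spd1 x.toNat : Int) := by
  obtain ⟨N, rfl⟩ : ∃ N : ℕ, x = (N : Int) := ⟨x.toNat, (Int.toNat_of_nonneg (by omega)).symm⟩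
  have hN1 : 1 ≤ N := by exact_mod_cast hx
  have hS1 : 1 ≤ Nat.sqrt N := Nat.sqrt_pos.mpr (by omega)
  unfold calcProperFactors
  rw [calc_fold (N : Int) hx (Nat.sqrt ((N : Int)).toNat) 2 [] (by omega) (le_refl 2) (by simp)]
  rw [List.nil_append, List.sum_append, sum_flatMap]
  rw [sum_map_pyRange]
  simp only [Int.toNat_natCast]
  have hlen : (((Nat.sqrt N : Int) + 1) - 2).toNat = Nat.sqrt N + 1 - 2 := by omega
  rw [hlen]
  have hstep : ∑ k ∈ Finset.range (Nat.sqrt N + 1 - 2),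
      (fun d => ((if PySem.Int.mod (N : Int) d = 0 then
              (if PySem.Int.floordiv (N : Int) d = d then [d] else [d, PySem.Int.floordiv (N : Int) d])
            else []) : List Int).sum) ((2:ℤ) + (k : Int))
      = ∑ d ∈ Finset.Ico 2 (Nat.sqrt N + 1),
          ((if d ∣ N then (if N / d = d then d else d + N / d) else 0 : ℕ) : ℤ) := by
    rw [Finset.sum_Ico_eq_sum_range]
    refine Finset.sum_congr rfl ?_
    intro k _
    have hre : ((2:ℤ) + (k : Int)) = ((2 + k : ℕ) : ℤ) := by push_cast; ring
    simp only [hre, PySem.Int.mod_natCast, PySem.Int.floordiv_natCast]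
    by_cases hdvd : (2 + k) ∣ N
    · have h0 : N % (2 + k) = 0 := by
        obtain ⟨c, hc⟩ := hdvd; rw [hc]; exact Nat.mul_mod_right _ _
      rw [h0]
      by_cases he : N / (2 + k) = 2 + k
      · simp [he, hdvd]
      · have he' : ((N / (2 + k) : ℕ) : ℤ) ≠ ((2 + k : ℕ) : ℤ) := by
          intro hc; exact he (by exact_mod_cast hc)
        rw [if_pos (by norm_num), if_neg he', if_pos hdvd, if_neg he]
        push_cast
        simp
    · have h0 : N % (2 + k) ≠ 0 := fun hc => hdvd (Nat.dvd_of_mod_eq_zero hc)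
      rw [if_neg (by exact_mod_cast h0), if_neg hdvd]
      simp
  rw [hstep, ← Nat.cast_sum, pairing N hN1]
  simp only [List.sum_cons, List.sum_nil, add_zero]
  ring

-- ---- B side: sieve characterization ----
theorem foldl_setD_length (f : List Int → Int → Int) : ∀ (ms : List Int) (ds : List Int),
    (ms.foldl (fun ds m => PySem.List.pySetD ds m (f ds m)) ds).length = ds.length := by
  intro ms
  induction ms with
  | nil => intro ds; rfl
  | cons m t ih => intro ds; rw [List.foldl_cons, ih, PySem.List.length_pySetD]

theorem inner_getD (d : Int) : ∀ (ms : List Int) (ds : List Int) (n : Int), ms.Nodup →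
    (∀ m ∈ ms, 0 ≤ m ∧ m.toNat < ds.length) → 0 ≤ n →
    PySem.List.pyGetD (ms.foldl (fun ds m => PySem.List.pySetD ds m (PySem.List.pyGetD ds m 0 + d)) ds) n 0
      = PySem.List.pyGetD ds n 0 + (if n ∈ ms then d else 0) := by
  intro ms
  induction ms with
  | nil => intro ds n _ _ _; simp
  | cons m t ih =>
    intro ds n hnd hb hn0
    obtain ⟨hm0, hmlen⟩ := hb m (List.mem_cons_self ..)
    have hlen : (PySem.List.pySetD ds m (PySem.List.pyGetD ds m 0 + d)).length = ds.length :=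
      PySem.List.length_pySetD ds m _
    rw [List.foldl_cons, ih _ n (List.nodup_cons.mp hnd).2
      (fun m' hm' => by rw [hlen]; exact hb m' (List.mem_cons_of_mem _ hm')) hn0]
    rw [PySem.List.pySetD_of_nonneg ds _ hm0, PySem.List.pyGetD_of_nonneg _ _ hn0,
      List.getD_eq_getElem?_getD]
    by_cases hnm : n = m
    · subst hnm
      rw [List.getElem?_set_self hmlen]
      have hnt : n ∉ t := (List.nodup_cons.mp hnd).1
      simp [hnt, PySem.List.pyGetD_of_nonneg ds _ hn0, List.getD_eq_getElem?_getD]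
    · have hne : m.toNat ≠ n.toNat := by omega
      rw [List.getElem?_set_ne hne]
      have hIf : (if n ∈ m :: t then (d:ℤ) else 0) = (if n ∈ t then d else 0) := by
        simp [List.mem_cons, hnm]
      rw [hIf, PySem.List.pyGetD_of_nonneg ds _ hn0, List.getD_eq_getElem?_getD]

theorem nodup_pyRange_pos (a b s : Int) (hs : 0 < s) : (PySem.List.pyRange a b s).Nodup := by
  rw [PySem.List.pyRange_of_pos a b hs]
  refine List.Nodup.map ?_ List.nodup_range
  intro k1 k2 h
  have h' : s * (k1 : ℤ) = s * (k2 : ℤ) := by linarith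
  exact_mod_cast mul_left_cancel₀ (ne_of_gt hs) h'

theorem sieve_fold_getD (limit : Int) : ∀ (dl : List Int) (init : List Int) (n : Int),
    (∀ d ∈ dl, 1 ≤ d) → 0 ≤ n → init.length = (limit + 1).toNat →
    PySem.List.pyGetD (dl.foldl
      (fun ds d => (PySem.List.pyRange (2 * d) (limit + 1) d).foldl
        (fun ds m => PySem.List.pySetD ds m (PySem.List.pyGetD ds m 0 + d)) ds) init) n 0
    = PySem.List.pyGetD init n 0
      + (dl.map (fun d => if n ∈ PySem.List.pyRange (2 * d) (limit + 1) d then d else 0)).sum := by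
  intro dl
  induction dl with
  | nil => intro init n _ _ _; simp
  | cons d t ih =>
    intro init n hdl hn0 hlen
    have hd1 : (1:ℤ) ≤ d := hdl d (List.mem_cons_self ..)
    have hinlen : ((PySem.List.pyRange (2 * d) (limit + 1) d).foldl
        (fun ds m => PySem.List.pySetD ds m (PySem.List.pyGetD ds m 0 + d)) init).length
        = init.length := foldl_setD_length _ _ init
    rw [List.foldl_cons, ih _ n (fun d' hd' => hdl d' (List.mem_cons_of_mem _ hd')) hn0
      (by rw [hinlen, hlen])]
    rw [inner_getD d _ init n (nodup_pyRange_pos _ _ _ (by omega)) ?_ hn0]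
    · simp only [List.map_cons, List.sum_cons]; ring
    · intro m hm
      rw [PySem.List.mem_pyRange_iff_of_pos (by omega)] at hm
      constructor
      · omega
      · rw [hlen]; omega

theorem sieve_sum_nat (N m : ℕ) (h1 : 1 ≤ N) (h2 : N ≤ m) :
    (∑ k ∈ Finset.range m, (if (1 + k) ∣ N ∧ 2 * (1 + k) ≤ N then ((1 + k : ℕ) : ℤ) else 0))
      = (spd N : ℤ) := by
  classical
  have h := Finset.sum_Ico_eq_sum_range
    (fun d => (if d ∣ N ∧ 2 * d ≤ N then ((d : ℕ) : ℤ) else 0)) 1 (1 + m)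
  rw [show 1 + m - 1 = m from by omega] at h
  rw [← h]
  rw [← Finset.sum_filter]
  have hfil : Finset.filter (fun d => d ∣ N ∧ 2 * d ≤ N) (Finset.Ico 1 (1 + m))
      = N.properDivisors := by
    ext d
    simp only [Finset.mem_filter, Finset.mem_Ico, Nat.mem_properDivisors]
    constructor
    · rintro ⟨⟨ha, hb⟩, hdvd, hle⟩
      exact ⟨hdvd, by omega⟩
    · rintro ⟨hdvd, hlt⟩
      have hd1 : 1 ≤ d := Nat.pos_of_dvd_of_pos hdvd h1
      obtain ⟨q, hq⟩ := hdvd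
      have hq2 : 2 ≤ q := by
        rcases Nat.lt_or_ge q 2 with h | h
        · interval_cases q <;> omega
        · exact h
      refine ⟨⟨hd1, by omega⟩, ⟨q, hq⟩, by nlinarith⟩
  rw [hfil]
  unfold spd
  rw [Nat.cast_sum]

theorem sieve_getD (limit n : Int) (h1 : 1 ≤ n) (h2 : n ≤ limit) :
    PySem.List.pyGetD (sieve limit) n 0 = (spd n.toNat : Int) := by
  have hnN : n = (n.toNat : Int) := (Int.toNat_of_nonneg (by omega)).symm
  unfold sieve
  rw [sieve_fold_getD limit (PySem.List.pyRange 1 (limit + 1) 1) _ n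
    (fun d hd => (PySem.List.mem_pyRange_one.mp hd).1) (by omega) (List.length_replicate ..)]
  rw [PySem.List.pyGetD_of_nonneg _ _ (by omega), List.getD_replicate _ (by omega), zero_add]
  have hcongr : (PySem.List.pyRange 1 (limit + 1) 1).map
        (fun d => if n ∈ PySem.List.pyRange (2 * d) (limit + 1) d then d else 0)
      = (PySem.List.pyRange 1 (limit + 1) 1).map
        (fun d => if d ∣ n ∧ 2 * d ≤ n then d else 0) := by
    refine List.map_congr_left ?_
    intro d hd
    rw [PySem.List.mem_pyRange_one] at hd
    have hmem : (n ∈ PySem.List.pyRange (2 * d) (limit + 1) d) ↔ (d ∣ n ∧ 2 * d ≤ n) := by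
      rw [PySem.List.mem_pyRange_iff_of_pos (by omega)]
      constructor
      · rintro ⟨ha, hb, hc⟩
        refine ⟨?_, ha⟩
        have : n = (n - 2 * d) + 2 * d := by ring
        rw [this]
        exact dvd_add hc ⟨2, by ring⟩
      · rintro ⟨ha, hb⟩
        exact ⟨hb, by omega, dvd_sub ha ⟨2, by ring⟩⟩
    rw [if_congr hmem rfl rfl]
  rw [hcongr, sum_map_pyRange]
  rw [show (limit + 1 - 1).toNat = limit.toNat from by omega]
  have hstep : ∀ k ∈ Finset.range limit.toNat,
      (fun d => if d ∣ n ∧ 2 * d ≤ n then d else 0) ((1:ℤ) + (k : Int))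
        = (if (1 + k) ∣ n.toNat ∧ 2 * (1 + k) ≤ n.toNat then ((1 + k : ℕ) : ℤ) else 0) := by
    intro k _
    have hre : ((1:ℤ) + (k : Int)) = ((1 + k : ℕ) : ℤ) := by push_cast; ring
    rw [hre]
    have hiff : (((1 + k : ℕ) : ℤ) ∣ n ∧ 2 * ((1 + k : ℕ) : ℤ) ≤ n)
        ↔ ((1 + k) ∣ n.toNat ∧ 2 * (1 + k) ≤ n.toNat) := by
      rw [hnN]
      constructor
      · rintro ⟨ha, hb⟩; exact ⟨by exact_mod_cast ha, by exact_mod_cast hb⟩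
      · rintro ⟨ha, hb⟩; exact ⟨by exact_mod_cast ha, by exact_mod_cast hb⟩
    dsimp only
    exact if_congr hiff rfl rfl
  rw [Finset.sum_congr rfl hstep, sieve_sum_nat n.toNat limit.toNat (by omega) (by omega)]

-- ---- B's two-pointer sweep equals the break scan on a sorted list ----
theorem innerB_takeWhile (limit x : Int) : ∀ (ab acc : List Int),
    innerB limit x ab acc
      = acc ++ (ab.takeWhile (fun y => decide (x + y < limit))).map (fun y => x + y) := by
  intro ab
  induction ab with
  | nil => intro acc; simp [innerB]
  | cons y ys ih =>
    intro acc
    simp only [innerB]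
    by_cases h : limit ≤ x + y
    · rw [if_pos h, List.takeWhile_cons_of_neg (by simp; omega)]
      simp
    · rw [if_neg h, ih, List.takeWhile_cons_of_pos (by simp; omega)]
      simp

theorem tc_mono (limit x x' : Int) (hxx : x ≤ x') : ∀ ab : List Int,
    (ab.takeWhile (fun y => decide (x' + y < limit))).length
      ≤ (ab.takeWhile (fun y => decide (x + y < limit))).length := by
  intro ab
  induction ab with
  | nil => simp
  | cons y ys ih =>
    by_cases h : x' + y < limit
    · rw [List.takeWhile_cons_of_pos (by simpa using h), List.takeWhile_cons_of_pos (by simp; omega)]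
      simpa using ih
    · rw [List.takeWhile_cons_of_neg (by simpa using h)]
      simp

theorem takeWhile_sat (p : Int → Bool) : ∀ (l : List Int) (i : ℕ),
    i < (l.takeWhile p).length → ∃ y, l[i]? = some y ∧ p y = true := by
  intro l
  induction l with
  | nil => intro i hi; simp at hi
  | cons a l ih =>
    intro i hi
    by_cases hpa : p a
    · rw [List.takeWhile_cons_of_pos hpa] at hi
      cases i with
      | zero => exact ⟨a, rfl, hpa⟩
      | succ i =>
        rw [List.getElem?_cons_succ]
        exact ih i (by simpa using hi)
    · rw [List.takeWhile_cons_of_neg hpa] at hi; simp at hi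

theorem takeWhile_stop (p : Int → Bool) : ∀ (l : List Int),
    (l.takeWhile p).length < l.length →
    ∃ y, l[(l.takeWhile p).length]? = some y ∧ p y = false := by
  intro l
  induction l with
  | nil => intro h; simp at h
  | cons a l ih =>
    intro h
    by_cases hpa : p a
    · rw [List.takeWhile_cons_of_pos hpa] at h ⊢
      rw [List.length_cons, List.getElem?_cons_succ]
      exact ih (by simpa using h)
    · rw [List.takeWhile_cons_of_neg hpa]
      exact ⟨a, rfl, by simpa using hpa⟩

theorem shrink_eq (limit x : Int) (ab : List Int) (hsort : ab.Pairwise (· < ·)) :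
    ∀ cut, (ab.takeWhile (fun y => decide (x + y < limit))).length ≤ cut → cut ≤ ab.length →
      shrinkCut limit x ab cut = (ab.takeWhile (fun y => decide (x + y < limit))).length := by
  intro cut
  induction cut with
  | zero => intro h1 _; simp only [shrinkCut]; omega
  | succ cut ih =>
    intro h1 h2
    have hcutlen : cut < ab.length := by omega
    have hval : PySem.List.pyGetD ab ((cut : Nat) : Int) 0 = ab[cut] := by
      rw [PySem.List.pyGetD_natCast, List.getD_eq_getElem?_getD, List.getElem?_eq_getElem hcutlen]
      rfl
    rcases Nat.lt_or_ge cut ((ab.takeWhile (fun y => decide (x + y < limit))).length) with hlt | hge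
    · obtain ⟨y, hy, hpy⟩ := takeWhile_sat _ ab cut hlt
      rw [List.getElem?_eq_getElem hcutlen] at hy
      have hysm : x + ab[cut] < limit := by
        have := of_decide_eq_true hpy
        have hyy : y = ab[cut] := (Option.some_inj.mp hy).symm
        omega
      simp only [shrinkCut, hval]
      rw [if_neg (by omega)]
      omega
    · have htlen : (ab.takeWhile (fun y => decide (x + y < limit))).length < ab.length := by omega
      obtain ⟨z, hz, hpz⟩ := takeWhile_stop _ ab htlen
      rw [List.getElem?_eq_getElem htlen] at hz
      have hzz : z = ab[(ab.takeWhile (fun y => decide (x + y < limit))).length]'htlen :=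
        (Option.some_inj.mp hz).symm
      have hzc : ab[(ab.takeWhile (fun y => decide (x + y < limit))).length]'htlen ≤ ab[cut] := by
        rcases Nat.lt_or_ge ((ab.takeWhile (fun y => decide (x + y < limit))).length) cut with h | h
        · exact le_of_lt ((List.pairwise_iff_getElem.mp hsort) _ cut htlen hcutlen h)
        · have he : (ab.takeWhile (fun y => decide (x + y < limit))).length = cut := by omega
          subst he
          exact le_refl _
      have hcond : limit ≤ x + ab[cut] := by
        have hnp := of_decide_eq_false hpz
        omega
      simp only [shrinkCut, hval]
      rw [if_pos hcond]
      exact ih (by omega) (by omega)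

theorem outerB_eq_sweep (limit : Int) (ab : List Int) (hsort : ab.Pairwise (· < ·)) :
    ∀ (xs : List Int) (cut : Nat) (acc : List Int), xs.Pairwise (· ≤ ·) →
      (∀ x ∈ xs, (ab.takeWhile (fun y => decide (x + y < limit))).length ≤ cut) →
      cut ≤ ab.length →
      outerB limit ab xs acc = sweep limit ab xs cut acc := by
  intro xs
  induction xs with
  | nil => intro cut acc _ _ _; rfl
  | cons x xs ih =>
    intro cut acc hws hall hlen
    have hcut' : shrinkCut limit x ab cut
        = (ab.takeWhile (fun y => decide (x + y < limit))).length :=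
      shrink_eq limit x ab hsort cut (hall x (List.mem_cons_self ..)) hlen
    simp only [outerB, sweep, hcut']
    rw [innerB_takeWhile]
    rw [show ab.take ((ab.takeWhile (fun y => decide (x + y < limit))).length)
        = ab.takeWhile (fun y => decide (x + y < limit)) from
      (List.prefix_iff_eq_take.mp (List.takeWhile_prefix _)).symm]
    exact ih _ _ (List.pairwise_cons.mp hws).2
      (fun x' hx' => tc_mono limit x x' ((List.pairwise_cons.mp hws).1 x' hx') ab)
      (List.takeWhile_prefix _).length_le

-- ---- the abundant lists agree ----
theorem abundant_eq (limit : Int) :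
    listAbundantNums limit
      = (PySem.List.pyRange 1 (limit + 1) 1).filter
          (fun n => decide (n < PySem.List.pyGetD (sieve limit) n 0)) := by
  simp only [listAbundantNums, List.map_map]
  rw [show (fun (acc : List Int) (p : Int × Int) => if p.1 < p.2 then acc ++ [p.1] else acc)
        = (fun acc p => if (fun (q : Int × Int) => decide (q.1 < q.2)) p = true
            then acc ++ [(fun (q : Int × Int) => q.1) p] else acc) from by
      funext acc p; by_cases h : p.1 < p.2 <;> simp [h]]
  rw [PySem.List.foldl_append_if, List.filter_map, List.map_map, List.nil_append]
  have hmapid : ((fun (q : Int × Int) => q.1) ∘ ((fun p : Int × Int => (p.1, (calcProperFactors p.1).sum)) ∘ (fun item : Int => (item, (0:Int))))) = id := by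
    funext z; rfl
  rw [hmapid, List.map_id]
  refine List.filter_congr ?_
  intro n hn
  rw [PySem.List.mem_pyRange_one] at hn
  obtain ⟨h1, h2⟩ := hn
  show decide (n < (calcProperFactors n).sum) = decide (n < PySem.List.pyGetD (sieve limit) n 0)
  rw [calc_sum n h1, sieve_getD limit n h1 (by omega)]
  rcases eq_or_lt_of_le h1 with he | hgt
  · rw [← he]
    norm_num [spd1, spd, Nat.properDivisors_one]
  · have h1N : 1 < n.toNat := by omega
    have hsp : spd n.toNat = 1 + spd1 n.toNat := by
      unfold spd spd1
      rw [← Finset.add_sum_erase _ _ (Nat.one_mem_properDivisors_iff_one_lt.mpr h1N)]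
    rw [hsp]
    refine decide_eq_decide.mpr ?_
    push_cast
    omega

-- ===== VERDICT (by name: the statement is the Claim_ definition above) =====
theorem list_abundant_sums_spec : Claim_equal_list_abundant_sums := by
  intro limit _
  unfold Spec_list_abundant_sums
  show list_abundant_sums limit = list_abundant_sums_alt limit
  simp only [list_abundant_sums, list_abundant_sums_alt]
  rw [abundant_eq limit]
  have hsort : ((PySem.List.pyRange 1 (limit + 1) 1).filter
      (fun n => decide (n < PySem.List.pyGetD (sieve limit) n 0))).Pairwise (· < ·) :=
    List.Pairwise.filter _ (PySem.List.pairwise_lt_pyRange_one 1 (limit + 1))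
  generalize hab : (PySem.List.pyRange 1 (limit + 1) 1).filter
      (fun n => decide (n < PySem.List.pyGetD (sieve limit) n 0)) = ab at hsort ⊢
  rw [outerA_eq, PySem.List.map_pyGetD_pyRange_zero' ab 0]
  exact outerB_eq_sweep limit ab hsort ab ab.length []
    (hsort.imp le_of_lt)
    (fun x _ => (List.takeWhile_prefix _).length_le)
    (le_refl _)
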